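-- pv_equiv track=rewrite | github.com/lane-neuro/research-analytics-suite | research_analytics_suite/hardware_manager/interface/usb/MicroUSB.py | _parse_darwin_output
-- ===== SOURCE A (Python) =====
-- from typing import List, Dict
--
-- def _parse_darwin_output(output: str) -> List[Dict[str, str]]:
--     devices = []
--     current_device = None
--     for line in output.split('\n'):
--         if 'Product ID' in line:
--             if current_device:
--                 devices.append(current_device)
--             current_device = {}
--         if current_device is not None:
--             if 'Product ID' in line:
--                 current_device['product_id'] = line.split(':')[-1].strip()
--             elif 'Vendor ID' in line:
--                 current_device['vendor_id'] = line.split(':')[-1].strip().split()[0]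
--                 current_device['vendor_name'] = ' '.join(line.split(':')[-1].strip().split()[1:])
--             elif 'Location ID' in line:
--                 current_device['location_id'] = line.split(':')[-1].strip()
--             elif 'Speed' in line:
--                 current_device['speed'] = line.split(':')[-1].strip()
--     if current_device:
--         devices.append(current_device)
--     return devices
-- ===== SOURCE B (Python) =====
-- from typing import List, Dict
--
--
-- def _set_fields(device: Dict[str, str], line: str) -> None:
--     value = line.split(':')[-1].strip()
--     if 'Product ID' in line:
--         device['product_id'] = value
--     elif 'Vendor ID' in line:
--         tokens = value.split()
--         device['vendor_id'] = tokens[0]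
--         device['vendor_name'] = ' '.join(tokens[1:])
--     elif 'Location ID' in line:
--         device['location_id'] = value
--     elif 'Speed' in line:
--         device['speed'] = value
--
--
-- def _parse_darwin_output(output: str) -> List[Dict[str, str]]:
--     # Group lines back-to-front into per-device segments, one per 'Product ID'
--     # line; lines before the first 'Product ID' are dropped automatically.
--     segments = []
--     acc = []
--     for line in reversed(output.split('\n')):
--         acc.append(line)
--         if 'Product ID' in line:
--             acc.reverse()
--             segments.append(acc)
--             acc = []
--     segments.reverse()
--     devices = []
--     for segment in segments:
--         device = {}
--         for line in segment:
--             _set_fields(device, line)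
--         devices.append(device)
--     return devices
-- ===== Notes on version B (the rewrite author's own statement) =====
-- stated objective: alternative
-- what changed: B replaces A's single stateful pass over an optional open dict (flush on each 'Product ID' boundary, trailing flush) by a two-phase decomposition: one reversed pass groups the lines into per-device segments (dropping lines before the first 'Product ID' automatically), then each segment is independently folded into its field dict.
import Mathlib
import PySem

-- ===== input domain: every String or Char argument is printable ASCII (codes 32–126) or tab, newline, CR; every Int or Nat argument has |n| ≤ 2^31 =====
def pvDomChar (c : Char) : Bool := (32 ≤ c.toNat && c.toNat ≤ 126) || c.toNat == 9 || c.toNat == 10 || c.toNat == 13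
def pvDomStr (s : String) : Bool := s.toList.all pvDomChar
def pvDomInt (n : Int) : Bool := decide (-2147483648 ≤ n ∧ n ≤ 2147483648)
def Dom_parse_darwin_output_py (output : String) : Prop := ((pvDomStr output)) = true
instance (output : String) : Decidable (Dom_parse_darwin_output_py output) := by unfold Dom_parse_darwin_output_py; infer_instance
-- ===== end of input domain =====

-- B regroups the work: one reversed pass cuts the lines into per-device segments
-- (one per 'Product ID' line, dropping the head lines), then each segment is
-- folded into its dict — instead of A's single pass over an optional open dict
-- with flush-on-boundary; objective: alternative decomposition, same cost.

-- ===== PORT A =====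
def pvPid : List Char := "Product ID".toList

-- line.split(':')[-1].strip()
def pvVal (line : List Char) : List Char :=
  PySem.Chars.strip ((PySem.Chars.splitOn line [':']).getLastD [])

-- the field-assignment branch block of A's loop body (on A's side the value
-- expression is recomputed inside each branch, as in A's Python).
-- '.split()[0]' raises IndexError on an empty token list in Python; that input
-- is outside Pre_ below, here 'headD' supplies a dummy.
def pvSetFieldsA (d : PySem.Dict String String) (line : List Char) : PySem.Dict String String :=
  if PySem.Chars.isIn pvPid line then
    d.insert "product_id" (String.ofList (pvVal line))
  else if PySem.Chars.isIn "Vendor ID".toList line then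
    (d.insert "vendor_id" (String.ofList ((PySem.Chars.split₀ (pvVal line)).headD []))).insert
      "vendor_name" (String.ofList (PySem.Chars.join [' '] ((PySem.Chars.split₀ (pvVal line)).drop 1)))
  else if PySem.Chars.isIn "Location ID".toList line then
    d.insert "location_id" (String.ofList (pvVal line))
  else if PySem.Chars.isIn "Speed".toList line then
    d.insert "speed" (String.ofList (pvVal line))
  else d

-- one iteration of A's loop: flush the open dict at a 'Product ID' boundary
-- ('if current_device:' is Python dict truthiness = items nonempty), then
-- assign fields into the open dict if one exists
def pvStepA (st : List (PySem.Dict String String) × Option (PySem.Dict String String))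
    (line : List Char) :
    List (PySem.Dict String String) × Option (PySem.Dict String String) :=
  let flushed :=
    if PySem.Chars.isIn pvPid line then
      ((match st.2 with
        | some d => if d.items.isEmpty then st.1 else st.1 ++ [d]
        | none => st.1), some PySem.Dict.empty)
    else st
  match flushed with
  | (devs, some d) => (devs, some (pvSetFieldsA d line))
  | (devs, none) => (devs, none)

def parse_darwin_output_py (output : String) : List (List (String × String)) :=
  (match (PySem.Chars.splitOn output.toList ['\n']).foldl pvStepA ([], none) with
   | (devs, some d) => if d.items.isEmpty then devs else devs ++ [d]
   | (devs, none) => devs).map (fun d : PySem.Dict String String => d.items)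

-- ===== PORT B =====
-- B's _set_fields: same branch block, value computed once up front
def pvSetFieldsB (d : PySem.Dict String String) (line : List Char) : PySem.Dict String String :=
  let value := pvVal line
  if PySem.Chars.isIn pvPid line then
    d.insert "product_id" (String.ofList value)
  else if PySem.Chars.isIn "Vendor ID".toList line then
    let toks := PySem.Chars.split₀ value
    (d.insert "vendor_id" (String.ofList (toks.headD []))).insert
      "vendor_name" (String.ofList (PySem.Chars.join [' '] (toks.drop 1)))
  else if PySem.Chars.isIn "Location ID".toList line then
    d.insert "location_id" (String.ofList value)
  else if PySem.Chars.isIn "Speed".toList line then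
    d.insert "speed" (String.ofList value)
  else d

-- one iteration of B's reversed grouping loop (foldr = the reversed for-loop;
-- st.2 is the accumulator of lines read since the last 'Product ID' boundary)
def pvGroupStep (line : List Char) (st : List (List (List Char)) × List (List Char)) :
    List (List (List Char)) × List (List Char) :=
  let acc := line :: st.2
  if PySem.Chars.isIn pvPid line then (acc :: st.1, []) else (st.1, acc)

def pvBuild (seg : List (List Char)) : PySem.Dict String String :=
  seg.foldl pvSetFieldsB PySem.Dict.empty

def parse_darwin_output_py_alt (output : String) : List (List (String × String)) :=
  ((PySem.Chars.splitOn output.toList ['\n']).foldr pvGroupStep ([], [])).1.map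
    (fun seg => (pvBuild seg).items)

-- ===== PRECONDITION & SPEC =====
-- a 'Vendor ID' line whose value after ':' has no tokens (Python '.split()[0]' raises there)
def pvBadVendor (line : List Char) : Bool :=
  PySem.Chars.isIn "Vendor ID".toList line && !PySem.Chars.isIn pvPid line &&
    (PySem.Chars.split₀ (pvVal line)).isEmpty

-- Pre_ excludes exactly the inputs on which the Pythons raise IndexError: a
-- 'Vendor ID' line with an empty value occurring after some 'Product ID' line
-- (both A and B raise there; neither returns a value).
def Pre_parse_darwin_output_py (output : String) : Prop :=
  (PySem.Chars.splitOn output.toList ['\n']).Pairwise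
    (fun a b => ¬ (PySem.Chars.isIn pvPid a = true ∧ pvBadVendor b = true))
instance (output : String) : Decidable (Pre_parse_darwin_output_py output) := by
  unfold Pre_parse_darwin_output_py; infer_instance

def pvWitness_parse_darwin_output_py : String := "Product ID: 0x12\nSpeed: fast"

def Spec_parse_darwin_output_py (output : String) (out : List (List (String × String))) : Prop := out = parse_darwin_output_py_alt output
instance (output : String) (out : List (List (String × String))) : Decidable (Spec_parse_darwin_output_py output out) := by unfold Spec_parse_darwin_output_py; infer_instance

-- ===== CLAIM (what is proved, stated in full; the proofs are below) =====
def Claim_equal_parse_darwin_output_py : Prop := ∀ (output : String), Dom_parse_darwin_output_py output → Pre_parse_darwin_output_py output → Spec_parse_darwin_output_py output (parse_darwin_output_py output)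

-- ===== LEMMAS AND PROOFS =====

-- the two Pythons' field-assignment blocks are the same computation
theorem pvSetFields_eq (d : PySem.Dict String String) (line : List Char) :
    pvSetFieldsA d line = pvSetFieldsB d line := rfl

theorem pvItems_insert_ne_nil (d : PySem.Dict String String) (k v : String) :
    (d.insert k v).items ≠ [] := by
  rcases d with ⟨items⟩
  cases items <;> simp [PySem.Dict.insert, PySem.Dict.contains]
  split <;> simp

theorem pvItems_setFieldsA_ne_nil (d : PySem.Dict String String) (line : List Char)
    (h : d.items ≠ []) : (pvSetFieldsA d line).items ≠ [] := by
  unfold pvSetFieldsA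
  split_ifs <;> first
    | exact pvItems_insert_ne_nil _ _ _
    | exact h

theorem pvItems_setFieldsA_empty_ne_nil (line : List Char)
    (h : PySem.Chars.isIn pvPid line = true) :
    (pvSetFieldsA PySem.Dict.empty line).items ≠ [] := by
  unfold pvSetFieldsA
  rw [if_pos h]
  exact pvItems_insert_ne_nil _ _ _

def pvFinish (st : List (PySem.Dict String String) × Option (PySem.Dict String String)) :
    List (PySem.Dict String String) :=
  match st with
  | (devs, some d) => if d.items.isEmpty then devs else devs ++ [d]
  | (devs, none) => devs

-- A's loop from an open nonempty dict = fill it with the head lines of the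
-- remaining list (those before its next 'Product ID'), then the full segments
theorem pvRunA_some (ls : List (List Char)) :
    ∀ (devices : List (PySem.Dict String String)) (d : PySem.Dict String String),
    d.items ≠ [] →
    pvFinish (ls.foldl pvStepA (devices, some d)) =
      devices ++ [(ls.foldr pvGroupStep ([], [])).2.foldl pvSetFieldsB d]
        ++ ((ls.foldr pvGroupStep ([], [])).1).map pvBuild := by
  induction ls with
  | nil =>
    intro devices d hd
    simp [pvFinish, List.isEmpty_iff, hd]
  | cons line rest ih =>
    intro devices d hd
    by_cases h : PySem.Chars.isIn pvPid line = true
    · have hstep : pvStepA (devices, some d) line =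
          (devices ++ [d], some (pvSetFieldsA PySem.Dict.empty line)) := by
        simp [pvStepA, h, List.isEmpty_iff, hd]
      rw [List.foldl_cons, hstep, ih _ _ (pvItems_setFieldsA_empty_ne_nil _ h)]
      simp [pvGroupStep, h, pvBuild, pvSetFields_eq]
    · have hstep : pvStepA (devices, some d) line =
          (devices, some (pvSetFieldsA d line)) := by
        simp [pvStepA, h]
      rw [List.foldl_cons, hstep, ih _ _ (pvItems_setFieldsA_ne_nil _ _ hd)]
      simp [pvGroupStep, h, pvSetFields_eq]

-- A's loop before the first 'Product ID' line collects nothing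
theorem pvRunA_none (ls : List (List Char)) :
    ∀ (devices : List (PySem.Dict String String)),
    pvFinish (ls.foldl pvStepA (devices, none)) =
      devices ++ ((ls.foldr pvGroupStep ([], [])).1).map pvBuild := by
  induction ls with
  | nil => intro devices; simp [pvFinish]
  | cons line rest ih =>
    intro devices
    by_cases h : PySem.Chars.isIn pvPid line = true
    · have hstep : pvStepA (devices, none) line =
          (devices, some (pvSetFieldsA PySem.Dict.empty line)) := by
        simp [pvStepA, h]
      rw [List.foldl_cons, hstep, pvRunA_some _ _ _ (pvItems_setFieldsA_empty_ne_nil _ h)]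
      simp [pvGroupStep, h, pvBuild, pvSetFields_eq]
    · have hstep : pvStepA (devices, none) line = (devices, none) := by
        simp [pvStepA, h]
      rw [List.foldl_cons, hstep, ih]
      simp [pvGroupStep, h]

-- ===== VERDICT (by name: the statement is the Claim_ definition above) =====
theorem parse_darwin_output_py_spec : Claim_equal_parse_darwin_output_py := by
  intro output _ _
  unfold Spec_parse_darwin_output_py parse_darwin_output_py
  show List.map (fun d : PySem.Dict String String => d.items) (pvFinish ((PySem.Chars.splitOn output.toList ['\n']).foldl pvStepA ([], none)))
      = parse_darwin_output_py_alt output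
  rw [pvRunA_none _ []]
  simp [parse_darwin_output_py_alt, List.map_map, Function.comp]
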